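-- pv_equiv track=rewrite | github.com/apache/hunter | hunter/util.py | remove_common_prefix
-- ===== SOURCE A (Python) =====
-- from typing import List, TypeVar, Set, Dict
--
-- def remove_common_prefix(names: List[str], sep: str = ".") \
--         -> List[str]:
--     """
--     """
--
--     if len(names) == 0:
--         return names
--
--     split_names = [name.split(sep) for name in names]
--     min_len = min(len(components) for components in split_names)
--
--     def are_same(index: int) -> bool:
--         return all(c[index] == split_names[0][index] for c in split_names)
--
--     prefix_len = 0
--     while prefix_len + 1 < min_len and are_same(prefix_len):
--         prefix_len += 1
--
--     return [sep.join(components[prefix_len:]) for components in split_names]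
-- ===== SOURCE B (Python) =====
-- def remove_common_prefix(names, sep="."):
--     if len(names) == 0:
--         return names
--     split_names = [name.split(sep) for name in names]
--     first = split_names[0]
--     run = len(first)
--     min_len = len(first)
--     for comps in split_names[1:]:
--         if len(comps) < min_len:
--             min_len = len(comps)
--         i = 0
--         while i < run and i < len(comps) and comps[i] == first[i]:
--             i += 1
--         run = i
--     prefix_len = min(run, min_len - 1)
--     return [sep.join(c[prefix_len:]) for c in split_names]
-- ===== Notes on version B (the rewrite author's own statement) =====
-- stated objective: alternative
-- what changed: Replaces A's column-by-column while loop that calls all() over every split name per column with a single name-by-name fold that maintains a bounded common-run counter against the first name (and the running minimum length), then caps it at min_len-1.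
import Mathlib
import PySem

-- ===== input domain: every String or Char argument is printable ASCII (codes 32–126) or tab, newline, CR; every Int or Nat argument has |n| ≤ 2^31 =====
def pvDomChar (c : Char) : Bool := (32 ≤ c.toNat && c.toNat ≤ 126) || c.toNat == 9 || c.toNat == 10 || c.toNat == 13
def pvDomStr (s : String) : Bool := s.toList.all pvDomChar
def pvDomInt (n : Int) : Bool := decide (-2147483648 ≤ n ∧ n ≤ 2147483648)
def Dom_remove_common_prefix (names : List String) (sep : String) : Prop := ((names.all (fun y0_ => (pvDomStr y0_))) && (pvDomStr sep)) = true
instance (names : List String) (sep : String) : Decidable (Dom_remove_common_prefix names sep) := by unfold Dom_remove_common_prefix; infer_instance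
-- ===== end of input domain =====

-- B replaces A's column-by-column while/all scan by a single per-name pass that folds a
-- bounded common-run counter (and the minimum length) over the names; objective: alternative
-- decomposition, same asymptotic cost.

-- name.split(sep): PySem.Str.split? is none exactly when sep = "" (Python raises ValueError
-- there; Pre_ excludes that case, so the [] default is unreachable). Shared by both ports.
def pvSplit (name : String) (sep : String) : List String :=
  (PySem.Str.split? name sep).getD []

-- ===== PORT A =====
-- min(len(c) for c in split_names): Python min over a nonempty list (nonempty is guaranteed
-- because this line is only reached when names ≠ []); the [] case is unreachable.
def pvMinNat : List Nat → Nat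
  | [] => 0
  | x :: xs => xs.foldl min x

-- are_same(index): all(c[index] == split_names[0][index] for c in split_names).
-- A only calls it with index in range for every c, so comparing pyGet? options is exact there.
def pvAreSame (split : List (List String)) (index : Nat) : Bool :=
  split.all (fun c => PySem.List.pyGet? c (index : Int) == PySem.List.pyGet? (split.headD []) (index : Int))

-- the while loop: prefix_len = 0; while prefix_len + 1 < min_len and are_same(prefix_len): prefix_len += 1
def pvALoop (split : List (List String)) (min_len : Nat) (p : Nat) : Nat :=
  if h : p + 1 < min_len ∧ pvAreSame split p = true then pvALoop split min_len (p + 1) else p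
termination_by min_len - p
decreasing_by omega

def remove_common_prefix (names : List String) (sep : String) : List String :=
  if names.length = 0 then names
  else
    let split_names := names.map (fun name => pvSplit name sep)
    let min_len := pvMinNat (split_names.map (fun c => c.length))
    let prefix_len := pvALoop split_names min_len 0
    -- components[prefix_len:] with prefix_len ≥ 0 is List.drop
    split_names.map (fun components => PySem.Str.join sep (components.drop prefix_len))

-- ===== PORT B =====
-- the inner while loop: i = 0; while i < run and i < len(comps) and comps[i] == first[i]: i += 1
def pvBRun : Nat → List String → List String → Nat
  | r + 1, a :: as, b :: bs => if a == b then pvBRun r as bs + 1 else 0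
  | _, _, _ => 0

def remove_common_prefix_alt (names : List String) (sep : String) : List String :=
  if names.length = 0 then names
  else
    let split_names := names.map (fun name => pvSplit name sep)
    let first := split_names.headD []
    let st := split_names.tail.foldl
      (fun (st : Nat × Nat) comps =>
        (pvBRun st.1 first comps, if comps.length < st.2 then comps.length else st.2))
      (first.length, first.length)
    let prefix_len := min st.1 (st.2 - 1)
    split_names.map (fun c => PySem.Str.join sep (c.drop prefix_len))

-- ===== PRECONDITION & SPEC =====
-- Pre_ excludes nonempty name lists with sep = "", where Python's str.split raises ValueError
-- (in A and in B alike); everything else is admitted.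
def Pre_remove_common_prefix (names : List String) (sep : String) : Prop :=
  names = [] ∨ sep ≠ ""
instance (names : List String) (sep : String) : Decidable (Pre_remove_common_prefix names sep) := by
  unfold Pre_remove_common_prefix; infer_instance

def pvWitness_remove_common_prefix : List String × String := (["hunter.util.a", "hunter.util.b"], ".")

def Spec_remove_common_prefix (names : List String) (sep : String) (out : List String) : Prop := out = remove_common_prefix_alt names sep
instance (names : List String) (sep : String) (out : List String) : Decidable (Spec_remove_common_prefix names sep out) := by unfold Spec_remove_common_prefix; infer_instance

-- ===== CLAIM (what is proved, stated in full; the proofs are below) =====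
def Claim_equal_remove_common_prefix : Prop := ∀ (names : List String) (sep : String), Dom_remove_common_prefix names sep → Pre_remove_common_prefix names sep → Spec_remove_common_prefix names sep (remove_common_prefix names sep)

-- ===== LEMMAS AND PROOFS =====

-- the (uncapped) length of the longest common leading run of two component lists
def pvLcp : List String → List String → Nat
  | a :: as, b :: bs => if a = b then pvLcp as bs + 1 else 0
  | _, _ => 0

theorem pvBRun_eq (r : Nat) (a b : List String) : pvBRun r a b = min r (pvLcp a b) := by
  induction a generalizing r b with
  | nil => cases r <;> cases b <;> simp [pvBRun, pvLcp]
  | cons x as ih =>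
    cases r with
    | zero => cases b <;> simp [pvBRun, pvLcp]
    | succ r =>
      cases b with
      | nil => simp [pvBRun, pvLcp]
      | cons y bs =>
        by_cases h : x = y
        · simp [pvBRun, pvLcp, h, ih, Nat.succ_min_succ]
        · simp [pvBRun, pvLcp, h]

theorem pvLcp_get (a b : List String) (p : Nat) (hp : p < pvLcp a b) : b[p]? = a[p]? := by
  induction a generalizing b p with
  | nil => simp [pvLcp] at hp
  | cons x as ih =>
    cases b with
    | nil => simp [pvLcp] at hp
    | cons y bs =>
      by_cases h : x = y
      · cases p with
        | zero => simp [h]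
        | succ p =>
          simp only [pvLcp, h, if_true] at hp
          simpa using ih bs p (by omega)
      · simp [pvLcp, h] at hp

theorem pvLcp_ne (a b : List String) (h1 : pvLcp a b < a.length) (h2 : pvLcp a b < b.length) :
    b[pvLcp a b]? ≠ a[pvLcp a b]? := by
  induction a generalizing b with
  | nil => simp at h1
  | cons x as ih =>
    cases b with
    | nil => simp at h2
    | cons y bs =>
      by_cases h : x = y
      · simp only [pvLcp, h, if_true, List.length_cons] at h1 h2 ⊢
        simpa using ih bs (by omega) (by omega)
      · simp [pvLcp, h]
        exact fun e => h e.symm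

-- generic facts about folding min ∘ g over a list
theorem pvFoldMin_le_init {α : Type} (g : α → Nat) (l : List α) (i : Nat) :
    l.foldl (fun r c => min r (g c)) i ≤ i := by
  induction l generalizing i with
  | nil => simp
  | cons c l ih =>
    simp only [List.foldl_cons]
    exact le_trans (ih _) (Nat.min_le_left _ _)

theorem pvFoldMin_le_mem {α : Type} (g : α → Nat) (l : List α) (i : Nat) (c : α) (hc : c ∈ l) :
    l.foldl (fun r c => min r (g c)) i ≤ g c := by
  induction l generalizing i with
  | nil => simp at hc
  | cons d l ih =>
    simp only [List.foldl_cons]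
    rcases List.mem_cons.mp hc with h | h
    · subst h
      exact le_trans (pvFoldMin_le_init g l _) (Nat.min_le_right _ _)
    · exact ih _ h

theorem pvFoldMin_attain {α : Type} (g : α → Nat) (l : List α) (i : Nat) :
    l.foldl (fun r c => min r (g c)) i = i ∨ ∃ c ∈ l, l.foldl (fun r c => min r (g c)) i = g c := by
  induction l generalizing i with
  | nil => left; rfl
  | cons d l ih =>
    simp only [List.foldl_cons]
    rcases ih (min i (g d)) with h | ⟨c, hc, h⟩
    · rcases Nat.le_total i (g d) with hle | hle
      · left; rw [h]; exact Nat.min_eq_left hle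
      · right; exact ⟨d, List.mem_cons_self, by rw [h]; exact Nat.min_eq_right hle⟩
    · right; exact ⟨c, List.mem_cons_of_mem _ hc, h⟩

-- the pair fold of B computes (foldl min∘lcp, foldl min∘length)
theorem pvFoldPair (first : List String) (l : List (List String)) (r0 m0 : Nat) :
    l.foldl (fun (st : Nat × Nat) comps =>
        (pvBRun st.1 first comps, if comps.length < st.2 then comps.length else st.2)) (r0, m0)
      = (l.foldl (fun r c => min r (pvLcp first c)) r0,
         l.foldl (fun m c => min m c.length) m0) := by
  induction l generalizing r0 m0 with
  | nil => rfl
  | cons c l ih =>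
    simp only [List.foldl_cons]
    rw [ih]
    congr 2
    · exact pvBRun_eq _ _ _
    · split <;> omega

theorem pvAreSame_of_lt (first : List String) (tail : List (List String)) (p : Nat)
    (h : ∀ c ∈ tail, p < pvLcp first c) (hf : p < first.length) :
    pvAreSame (first :: tail) p = true := by
  simp only [pvAreSame, List.headD_cons, List.all_eq_true]
  intro c hc
  rcases List.mem_cons.mp hc with h0 | hc
  · subst h0; simp
  · have := pvLcp_get first c p (h c hc)
    simp [PySem.List.pyGet?_natCast, this]

-- the core loop characterisation: A's while-loop lands on min R (M-1)
theorem pvALoop_eq (first : List String) (tail : List (List String)) (R M : Nat)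
    (hR : R = tail.foldl (fun r c => min r (pvLcp first c)) first.length)
    (hM : M = tail.foldl (fun m c => min m c.length) first.length) :
    ∀ n p, p ≤ min R (M - 1) → min R (M - 1) - p = n →
      pvALoop (first :: tail) M p = min R (M - 1) := by
  have hRf : R ≤ first.length := hR ▸ pvFoldMin_le_init _ tail _
  have hRc : ∀ c ∈ tail, R ≤ pvLcp first c := fun c hc => hR ▸ pvFoldMin_le_mem _ tail _ c hc
  have hMf : M ≤ first.length := hM ▸ pvFoldMin_le_init (fun c => c.length) tail _
  have hMc : ∀ c ∈ tail, M ≤ c.length := fun c hc => hM ▸ pvFoldMin_le_mem (fun c => c.length) tail _ c hc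
  intro n
  induction n with
  | zero =>
    intro p hp h0
    have hpK : p = min R (M - 1) := by omega
    rw [pvALoop]
    split
    · rename_i hcond
      obtain ⟨hlt, hsame⟩ := hcond
      -- p + 1 < M and p = min R (M-1) force R = p < M - 1: a mismatch column exists
      have hRp : R = p := by omega
      have hRlt : R < M - 1 := by omega
      exfalso
      rcases hR ▸ pvFoldMin_attain (pvLcp first) tail first.length with he | ⟨c, hc, he⟩
      · omega
      · have hcl : R < c.length := lt_of_lt_of_le (by omega) (hMc c hc)
        have hfl : R < first.length := by omega
        have h1 : pvLcp first c < first.length := by rw [← he]; exact hfl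
        have h2 : pvLcp first c < c.length := by rw [← he]; exact hcl
        have hne := pvLcp_ne first c h1 h2
        rw [← he, hRp] at hne
        simp only [pvAreSame, List.headD_cons, List.all_eq_true] at hsame
        have := hsame c (List.mem_cons_of_mem _ hc)
        simp only [PySem.List.pyGet?_natCast, beq_iff_eq] at this
        exact hne this
    · omega
  | succ n ih =>
    intro p hp h0
    have hpK : p < min R (M - 1) := by omega
    rw [pvALoop]
    have hc1 : p + 1 < M := by omega
    have hc2 : pvAreSame (first :: tail) p = true := by
      apply pvAreSame_of_lt
      · intro c hc; exact lt_of_lt_of_le (by omega) (hRc c hc)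
      · omega
    rw [dif_pos ⟨hc1, hc2⟩]
    exact ih (p + 1) (by omega) (by omega)

-- ===== VERDICT (by name: the statement is the Claim_ definition above) =====
theorem remove_common_prefix_spec : Claim_equal_remove_common_prefix := by
  intro names sep _ _
  unfold Spec_remove_common_prefix remove_common_prefix remove_common_prefix_alt
  cases names with
  | nil => rfl
  | cons n ns =>
    rw [if_neg (by simp), if_neg (by simp)]
    simp only [List.map_cons, List.headD_cons, List.tail_cons]
    set first := pvSplit n sep with hfirst
    set tail := ns.map (fun name => pvSplit name sep) with htail
    rw [pvFoldPair]
    set R := tail.foldl (fun r c => min r (pvLcp first c)) first.length with hR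
    set M := tail.foldl (fun m c => min m c.length) first.length with hM
    have hMeq : pvMinNat (first.length :: tail.map (fun c => c.length)) = M := by
      simp only [pvMinNat, hM, List.foldl_map]
    rw [hMeq, pvALoop_eq first tail R M hR hM (min R (M - 1) - 0) 0 (by omega) rfl]
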